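-- pv_equiv track=rewrite | github.com/Santyofc/Skill-ECADI | scripts/smart_message_analyzer.py | choose_primary_intent
-- ===== SOURCE A (Python) =====
-- INTENT_PRIORITY = [
--     "matricula",
--     "costos-promociones",
--     "formas-de-pago",
--     "requisitos",
--     "fechas-convocatoria",
--     "modalidad-sincronica",
--     "modalidad-asincronica",
--     "programas",
--     "demo",
--     "ubicacion-contacto",
--     "objecion-costo",
--     "objecion-tiempo",
--     "objecion-confianza",
--     "emotional-support",
--     "seguimiento",
--     "reactivacion",
--     "reclamo",
--     "consulta-legal",
--     "posible-spam",
--     "info-general",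
--     "small-talk",
--     "agradecimiento",
--     "saludo",
--     "despedida",
-- ]
--
-- def choose_primary_intent(scores: dict) -> str:
--     max_score = max(scores.values())
--     if max_score <= 0:
--         return "info-general"
--
--     candidates = {intent for intent, value in scores.items() if value == max_score}
--     for intent in INTENT_PRIORITY:
--         if intent in candidates:
--             return intent
--     return sorted(candidates)[0]
-- ===== SOURCE B (Python) =====
-- INTENT_PRIORITY = [
--     "matricula",
--     "costos-promociones",
--     "formas-de-pago",
--     "requisitos",
--     "fechas-convocatoria",
--     "modalidad-sincronica",
--     "modalidad-asincronica",
--     "programas",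
--     "demo",
--     "ubicacion-contacto",
--     "objecion-costo",
--     "objecion-tiempo",
--     "objecion-confianza",
--     "emotional-support",
--     "seguimiento",
--     "reactivacion",
--     "reclamo",
--     "consulta-legal",
--     "posible-spam",
--     "info-general",
--     "small-talk",
--     "agradecimiento",
--     "saludo",
--     "despedida",
-- ]
--
--
-- def choose_primary_intent(scores: dict) -> str:
--     # One pass over the dict: keep the lexicographically smallest key
--     # (-value, priority rank, intent); its intent is the answer unless the
--     # top value is <= 0.
--     rank = {intent: i for i, intent in enumerate(INTENT_PRIORITY)}
--     default = len(INTENT_PRIORITY)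
--     best = None
--     for intent, value in scores.items():
--         key = (-value, rank.get(intent, default), intent)
--         if best is None or key < best:
--             best = key
--     if best[0] >= 0:
--         return "info-general"
--     return best[2]
-- ===== Notes on version B (the rewrite author's own statement) =====
-- stated objective: alternative
-- what changed: Replaces A's staged pipeline (max of values, then a candidate set, then a scan of INTENT_PRIORITY with membership tests, then a sorted()[0] fallback) by one pass over the dict that keeps the lexicographically smallest tuple (-value, priority rank, intent), with rank looked up in an index built once; the <=0 guard is read off the kept tuple.
-- outside the precondition, e.g. on choose_primary_intent({}): A raises ValueError, B raises TypeError
import Mathlib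
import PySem

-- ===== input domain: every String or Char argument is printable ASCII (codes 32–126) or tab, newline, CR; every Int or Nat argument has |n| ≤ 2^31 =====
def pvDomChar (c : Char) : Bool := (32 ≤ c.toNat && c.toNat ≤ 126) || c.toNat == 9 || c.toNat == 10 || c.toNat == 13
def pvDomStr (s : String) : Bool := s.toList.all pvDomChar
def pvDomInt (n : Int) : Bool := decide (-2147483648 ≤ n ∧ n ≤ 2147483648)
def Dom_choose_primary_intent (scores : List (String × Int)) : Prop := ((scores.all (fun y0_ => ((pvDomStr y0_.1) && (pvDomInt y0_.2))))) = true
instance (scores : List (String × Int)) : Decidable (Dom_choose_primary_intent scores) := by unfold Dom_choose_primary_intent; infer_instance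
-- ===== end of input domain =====

-- B replaces A's staged pipeline (max of values, candidate set, scan of INTENT_PRIORITY,
-- sorted()[0] fallback) by one pass keeping the smallest tuple (-value, rank, intent) (objective: alternative).

-- ===== PORT A =====
def INTENT_PRIORITY : List String :=
  ["matricula", "costos-promociones", "formas-de-pago", "requisitos",
   "fechas-convocatoria", "modalidad-sincronica", "modalidad-asincronica",
   "programas", "demo", "ubicacion-contacto", "objecion-costo",
   "objecion-tiempo", "objecion-confianza", "emotional-support",
   "seguimiento", "reactivacion", "reclamo", "consulta-legal",
   "posible-spam", "info-general", "small-talk", "agradecimiento",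
   "saludo", "despedida"]

def choose_primary_intent (scores : List (String × Int)) : String :=
  match PySem.List.max? (scores.map (fun kv => kv.2)) (fun v => v) with
  | none => ""   -- max() on an empty dict raises ValueError; excluded by Pre_
  | some max_score =>
    if max_score ≤ 0 then "info-general"
    else
      let candidates : PySem.Set String :=
        PySem.Set.ofList ((scores.filter (fun kv => kv.2 == max_score)).map (fun kv => kv.1))
      match INTENT_PRIORITY.find? (fun intent => PySem.Set.contains candidates intent) with
      | some intent => intent
      | none => (PySem.List.pyGet? (PySem.List.sorted candidates (fun x => x) false) 0).getD ""

-- ===== PORT B =====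
-- Python's `<` on an (int, int, str) tuple, ported by hand (exact: lexicographic,
-- component orders are the int and string orders).
def pvTupleLt (a b : Int × Int × String) : Bool :=
  a.1 < b.1 || (a.1 == b.1 && (a.2.1 < b.2.1 || (a.2.1 == b.2.1 && a.2.2 < b.2.2)))

def choose_primary_intent_alt (scores : List (String × Int)) : String :=
  let rank : PySem.Dict String Int :=
    (PySem.List.enumerate INTENT_PRIORITY).foldl (fun d p => d.insert p.2 p.1) PySem.Dict.empty
  let dflt : Int := (INTENT_PRIORITY.length : Int)
  let best : Option (Int × Int × String) :=
    scores.foldl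
      (fun best kv =>
        let key : Int × Int × String := (-kv.2, PySem.Dict.getD rank kv.1 dflt, kv.1)
        match best with
        | none => some key
        | some b => if pvTupleLt key b then some key else some b)
      none
  match best with
  | none => ""   -- empty dict: `best[0]` on None raises TypeError; excluded by Pre_
  | some b => if 0 ≤ b.1 then "info-general" else b.2.2

-- ===== PRECONDITION & SPEC =====
-- Pre_ excludes the empty dict, on which both programs raise (A: ValueError from max(),
-- B: TypeError from subscripting None), and association lists with duplicate keys,
-- which do not represent a Python dict (both programs take a dict).
def Pre_choose_primary_intent (scores : List (String × Int)) : Prop :=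
  scores ≠ [] ∧ (scores.map Prod.fst).Nodup

instance (scores : List (String × Int)) : Decidable (Pre_choose_primary_intent scores) := by
  unfold Pre_choose_primary_intent; infer_instance

def pvWitness_choose_primary_intent : (List (String × Int)) :=
  [("hola", 1), ("demo", 2), ("matricula", 2)]

def Spec_choose_primary_intent (scores : List (String × Int)) (out : String) : Prop := out = choose_primary_intent_alt scores
instance (scores : List (String × Int)) (out : String) : Decidable (Spec_choose_primary_intent scores out) := by unfold Spec_choose_primary_intent; infer_instance

-- ===== CLAIM (what is proved, stated in full; the proofs are below) =====
def Claim_equal_choose_primary_intent : Prop := ∀ (scores : List (String × Int)), Dom_choose_primary_intent scores → Pre_choose_primary_intent scores → Spec_choose_primary_intent scores (choose_primary_intent scores)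

-- ===== LEMMAS AND PROOFS =====

-- the rank B's key uses
def pvRank (c : String) : Int :=
  PySem.Dict.getD
    ((PySem.List.enumerate INTENT_PRIORITY).foldl (fun d p => d.insert p.2 p.1) PySem.Dict.empty)
    c (INTENT_PRIORITY.length : Int)

-- B's key of one dict entry
def pvKey (kv : String × Int) : Int × Int × String := (-kv.2, pvRank kv.1, kv.1)

-- non-strict lexicographic order on the triples
def pvTLe (a b : Int × Int × String) : Prop :=
  a.1 < b.1 ∨ (a.1 = b.1 ∧ (a.2.1 < b.2.1 ∨ (a.2.1 = b.2.1 ∧ ¬ b.2.2 < a.2.2)))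

lemma pvTLe_refl (a : Int × Int × String) : pvTLe a a :=
  Or.inr ⟨rfl, Or.inr ⟨rfl, lt_irrefl _⟩⟩

lemma pvTLe_trans {a b c : Int × Int × String} (h1 : pvTLe a b) (h2 : pvTLe b c) : pvTLe a c := by
  rcases h1 with h1 | ⟨e1, h1⟩ <;> rcases h2 with h2 | ⟨e2, h2⟩
  · exact Or.inl (h1.trans h2)
  · exact Or.inl (e2 ▸ h1)
  · exact Or.inl (e1 ▸ h2)
  · refine Or.inr ⟨e1.trans e2, ?_⟩
    rcases h1 with h1 | ⟨f1, h1⟩ <;> rcases h2 with h2 | ⟨f2, h2⟩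
    · exact Or.inl (h1.trans h2)
    · exact Or.inl (f2 ▸ h1)
    · exact Or.inl (f1 ▸ h2)
    · exact Or.inr ⟨f1.trans f2, fun h => h1 (lt_of_le_of_lt (not_lt.mp h2) h)⟩

lemma pvTLe_antisymm {a b : Int × Int × String} (h1 : pvTLe a b) (h2 : pvTLe b a) : a = b := by
  have e1 : a.1 = b.1 := by
    rcases h1 with h | ⟨e, -⟩ <;> rcases h2 with h' | ⟨e', -⟩ <;> omega
  have e2 : a.2.1 = b.2.1 := by
    rcases h1 with h | ⟨-, h⟩
    · omega
    rcases h2 with h' | ⟨-, h'⟩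
    · omega
    rcases h with h | ⟨f, -⟩ <;> rcases h' with h' | ⟨f', -⟩ <;> omega
  have e3 : a.2.2 = b.2.2 := by
    rcases h1 with h | ⟨-, h⟩
    · omega
    rcases h2 with h' | ⟨-, h'⟩
    · omega
    rcases h with h | ⟨-, hn⟩
    · omega
    rcases h' with h' | ⟨-, hn'⟩
    · omega
    exact le_antisymm (not_lt.mp hn) (not_lt.mp hn')
  exact Prod.ext e1 (Prod.ext e2 e3)

lemma pvTupleLt_true {a b : Int × Int × String} (h : pvTupleLt a b = true) : pvTLe a b := by
  unfold pvTupleLt at h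
  simp only [Bool.or_eq_true, Bool.and_eq_true, decide_eq_true_eq, beq_iff_eq] at h
  rcases h with h | ⟨e1, h | ⟨e2, h⟩⟩
  · exact Or.inl h
  · exact Or.inr ⟨e1, Or.inl h⟩
  · exact Or.inr ⟨e1, Or.inr ⟨e2, lt_asymm h⟩⟩

lemma pvTupleLt_false {a b : Int × Int × String} (h : pvTupleLt a b = false) : pvTLe b a := by
  unfold pvTupleLt at h
  simp only [Bool.or_eq_false_iff, Bool.and_eq_false_iff, decide_eq_false_iff_not,
    beq_eq_false_iff_ne, ne_eq] at h
  obtain ⟨h1, h2⟩ := h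
  by_cases e1 : a.1 = b.1
  · rcases h2 with h2 | ⟨h3, h4⟩
    · exact absurd e1 h2
    by_cases e2 : a.2.1 = b.2.1
    · rcases h4 with h4 | h4
      · exact absurd e2 h4
      · exact Or.inr ⟨e1.symm, Or.inr ⟨e2.symm, h4⟩⟩
    · exact Or.inr ⟨e1.symm, Or.inl (by omega)⟩
  · exact Or.inl (by omega)

-- B's fold step, with the rank dict folded into pvKey
def pvBStep (best : Option (Int × Int × String)) (kv : String × Int) : Option (Int × Int × String) :=
  match best with
  | none => some (pvKey kv)
  | some b => if pvTupleLt (pvKey kv) b then some (pvKey kv) else some b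

lemma pvBStep_cases (b : Int × Int × String) (kv : String × Int) :
    (pvBStep (some b) kv = some (pvKey kv) ∧ pvTLe (pvKey kv) b) ∨
    (pvBStep (some b) kv = some b ∧ pvTLe b (pvKey kv)) := by
  unfold pvBStep
  cases h : pvTupleLt (pvKey kv) b
  · exact Or.inr ⟨by simp [h], pvTupleLt_false h⟩
  · exact Or.inl ⟨by simp [h], pvTupleLt_true h⟩

lemma pvBStep_some (a : Int × Int × String) :
    ∀ xs : List (String × Int), ∃ m, xs.foldl pvBStep (some a) = some m := by
  intro xs
  induction xs generalizing a with
  | nil => exact ⟨a, rfl⟩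
  | cons x t ih =>
    rw [List.foldl_cons]
    rcases pvBStep_cases a x with ⟨hstep, -⟩ | ⟨hstep, -⟩ <;> rw [hstep]
    · exact ih _
    · exact ih a

lemma pvBfold_go : ∀ (xs : List (String × Int)) (acc : Option (Int × Int × String)) (m : Int × Int × String),
    xs.foldl pvBStep acc = some m →
    ((∃ kv ∈ xs, pvKey kv = m) ∨ acc = some m) ∧ (∀ kv ∈ xs, pvTLe m (pvKey kv)) ∧
      (∀ a, acc = some a → pvTLe m a) := by
  intro xs
  induction xs with
  | nil =>
    intro acc m h
    simp only [List.foldl_nil] at h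
    refine ⟨Or.inr h, by simp, fun a ha => ?_⟩
    rw [h] at ha; cases ha; exact pvTLe_refl _
  | cons x t ih =>
    intro acc m h
    rw [List.foldl_cons] at h
    obtain ⟨hmem, hall, hacc⟩ := ih (pvBStep acc x) m h
    rcases acc with _ | a
    · have hx : pvTLe m (pvKey x) := hacc _ rfl
      refine ⟨?_, ?_, fun a ha => by cases ha⟩
      · rcases hmem with ⟨kv, hkv, hk⟩ | hm
        · exact Or.inl ⟨kv, List.mem_cons_of_mem _ hkv, hk⟩
        · cases hm; exact Or.inl ⟨x, List.mem_cons_self, rfl⟩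
      · intro kv hkv
        rcases List.mem_cons.mp hkv with rfl | hkv
        · exact hx
        · exact hall kv hkv
    · rcases pvBStep_cases a x with ⟨hstep, hxa⟩ | ⟨hstep, hax⟩
      · have hx : pvTLe m (pvKey x) := hacc _ hstep
        have ha : pvTLe m a := pvTLe_trans hx hxa
        refine ⟨?_, ?_, fun b hb => by cases hb; exact ha⟩
        · rcases hmem with ⟨kv, hkv, hk⟩ | hm
          · exact Or.inl ⟨kv, List.mem_cons_of_mem _ hkv, hk⟩
          · rw [hstep] at hm; cases hm; exact Or.inl ⟨x, List.mem_cons_self, rfl⟩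
        · intro kv hkv
          rcases List.mem_cons.mp hkv with rfl | hkv
          · exact hx
          · exact hall kv hkv
      · have ha : pvTLe m a := hacc _ hstep
        have hx : pvTLe m (pvKey x) := pvTLe_trans ha hax
        refine ⟨?_, ?_, fun b hb => by cases hb; exact ha⟩
        · rcases hmem with ⟨kv, hkv, hk⟩ | hm
          · exact Or.inl ⟨kv, List.mem_cons_of_mem _ hkv, hk⟩
          · rw [hstep] at hm; cases hm; exact Or.inr rfl
        · intro kv hkv
          rcases List.mem_cons.mp hkv with rfl | hkv
          · exact hx
          · exact hall kv hkv

-- ranks: members of the priority list get their index, everything else the default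
lemma getD_enum_foldl (l : List String) (hnd : l.Nodup) :
    ∀ (s : Int) (d : PySem.Dict String Int) (c : String),
      PySem.Dict.getD ((PySem.List.enumerate l s).foldl (fun d p => d.insert p.2 p.1) d) c 24
        = if c ∈ l then s + (l.idxOf c : Int) else PySem.Dict.getD d c 24 := by
  induction l with
  | nil => intro s d c; simp [PySem.List.enumerate]
  | cons x t ih =>
    intro s d c
    have hxt : x ∉ t := (List.nodup_cons.mp hnd).1
    have ht : t.Nodup := (List.nodup_cons.mp hnd).2
    have henum : PySem.List.enumerate (x :: t) s = (s, x) :: PySem.List.enumerate t (s + 1) := rfl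
    rw [henum, List.foldl_cons]
    by_cases hcx : c = x
    · subst hcx
      rw [ih ht (s + 1) (d.insert c s) c]
      simp [hxt]
    · rw [ih ht (s + 1) (d.insert x s) c]
      by_cases hct : c ∈ t
      · simp only [hct, List.mem_cons, or_true, if_true]
        rw [List.idxOf_cons_ne _ (fun e => hcx e.symm)]
        push_cast
        ring
      · have : c ∉ x :: t := by simp [hcx, hct]
        simp only [hct, this, if_false]
        rw [PySem.Dict.getD_insert]
        simp [hcx]

lemma priority_nodup : INTENT_PRIORITY.Nodup := by decide

lemma priority_len : (INTENT_PRIORITY.length : Int) = 24 := by decide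

lemma pvRank_mem {c : String} (h : c ∈ INTENT_PRIORITY) :
    pvRank c = (INTENT_PRIORITY.idxOf c : Int) := by
  unfold pvRank
  rw [priority_len, getD_enum_foldl INTENT_PRIORITY priority_nodup 0 PySem.Dict.empty c]
  simp [h]

lemma pvRank_not_mem {c : String} (h : c ∉ INTENT_PRIORITY) : pvRank c = 24 := by
  unfold pvRank
  rw [priority_len, getD_enum_foldl INTENT_PRIORITY priority_nodup 0 PySem.Dict.empty c]
  simp [h, PySem.Dict.getD_empty]

lemma pvRank_lt_of_mem {c : String} (h : c ∈ INTENT_PRIORITY) : pvRank c < 24 := by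
  rw [pvRank_mem h]
  have := List.idxOf_lt_length_of_mem h
  have h24 : INTENT_PRIORITY.length = 24 := by decide
  omega

-- find? returns the element of least index satisfying the predicate
lemma find?_first {l : List String} (hnd : l.Nodup) {pred : String → Bool} {p : String}
    (h : l.find? pred = some p) : ∀ q ∈ l, pred q = true → l.idxOf p ≤ l.idxOf q := by
  induction l with
  | nil => intro q hq; cases hq
  | cons x t ih =>
    intro q hq hpq
    by_cases hpx : pred x = true
    · rw [List.find?_cons_of_pos hpx] at h
      cases h
      simp [List.idxOf_cons_self]
    · rw [List.find?_cons_of_neg hpx] at h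
      have hpt : p ∈ t := List.mem_of_find?_eq_some h
      have hxt : x ∉ t := (List.nodup_cons.mp hnd).1
      have hpx' : p ≠ x := fun e => hxt (e ▸ hpt)
      rcases List.mem_cons.mp hq with rfl | hqt
      · exact absurd hpq hpx
      · have hqx : q ≠ x := fun e => hxt (e ▸ hqt)
        rw [List.idxOf_cons_ne _ (fun e => hpx' e.symm), List.idxOf_cons_ne _ (fun e => hqx e.symm)]
        exact Nat.add_le_add_right (ih (List.nodup_cons.mp hnd).2 h q hqt hpq) 1

-- the "second half" of pvTLe restricted to equal first components, as an order on names
def pvLexLe (x y : String) : Prop := pvRank x < pvRank y ∨ (pvRank x = pvRank y ∧ ¬ y < x)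

-- A's selection is a pvLexLe-minimum of the candidate set
lemma A_select_min (cands : List String) (r : String)
    (hr : (match INTENT_PRIORITY.find? (fun intent => PySem.Set.contains (PySem.Set.ofList cands) intent) with
           | some intent => intent
           | none => (PySem.List.pyGet? (PySem.List.sorted (PySem.Set.ofList cands) (fun x => x) false) 0).getD "") = r)
    (hne : cands ≠ []) :
    r ∈ cands ∧ ∀ y ∈ cands, pvLexLe r y := by
  have hcont : ∀ z : String, PySem.Set.contains (PySem.Set.ofList cands) z = true ↔ z ∈ cands := by
    intro z
    simp [PySem.Set.contains, PySem.Set.mem_ofList]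
  rcases hf : INTENT_PRIORITY.find? (fun intent => PySem.Set.contains (PySem.Set.ofList cands) intent) with _ | p
  · rw [hf] at hr
    replace hr : (PySem.List.pyGet? (PySem.List.sorted (PySem.Set.ofList cands) (fun x => x) false) 0).getD "" = r := hr
    have hnone : ∀ z ∈ cands, z ∉ INTENT_PRIORITY := by
      intro z hz hzP
      have := List.find?_eq_none.mp hf z hzP
      exact this ((hcont z).mpr hz)
    rcases hs : PySem.List.sorted (PySem.Set.ofList cands) (fun x : String => x) false with _ | ⟨m, t⟩
    · exfalso
      have : PySem.Set.ofList cands = [] := (PySem.List.sorted_eq_nil_iff _ _ _).mp hs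
      rcases cands with _ | ⟨c, cs⟩
      · exact hne rfl
      · have : c ∈ PySem.Set.ofList (c :: cs) := (PySem.Set.mem_ofList _ _).mpr List.mem_cons_self
        rw [‹PySem.Set.ofList (c :: cs) = []›] at this
        cases this
    · rw [hs] at hr
      have hm0 : (PySem.List.pyGet? (m :: t) 0).getD "" = m := by
        simp
      rw [hm0] at hr
      subst hr
      have hrmem : m ∈ cands := by
        have hmem : m ∈ PySem.List.sorted (PySem.Set.ofList cands) (fun x : String => x) false := by
          rw [hs]; exact List.mem_cons_self
        exact (PySem.Set.mem_ofList _ _).mp ((PySem.List.mem_sorted _ _ _ _).mp hmem)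
      refine ⟨hrmem, fun y hy => ?_⟩
      have hle : m ≤ y :=
        PySem.List.key_head_sorted_le (PySem.Set.ofList cands) (fun x : String => x) hs y
          ((PySem.Set.mem_ofList _ _).mpr hy)
      exact Or.inr ⟨by rw [pvRank_not_mem (hnone m hrmem), pvRank_not_mem (hnone y hy)],
        not_lt.mpr hle⟩
  · rw [hf] at hr
    replace hr : p = r := hr
    subst hr
    have hrP : p ∈ INTENT_PRIORITY := List.mem_of_find?_eq_some hf
    have hrC : p ∈ cands := (hcont p).mp (List.find?_some hf)
    refine ⟨hrC, fun y hy => ?_⟩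
    by_cases hyP : y ∈ INTENT_PRIORITY
    · have hidx : INTENT_PRIORITY.idxOf p ≤ INTENT_PRIORITY.idxOf y :=
        find?_first priority_nodup hf y hyP ((hcont y).mpr hy)
      rcases lt_or_eq_of_le hidx with hlt | heq
      · refine Or.inl ?_
        rw [pvRank_mem hrP, pvRank_mem hyP]
        exact_mod_cast hlt
      · have hpy : p = y := (List.idxOf_inj hrP).mp heq
        subst hpy
        exact Or.inr ⟨rfl, lt_irrefl _⟩
    · refine Or.inl ?_
      rw [pvRank_not_mem hyP]
      exact pvRank_lt_of_mem hrP

-- ===== VERDICT (by name: the statement is the Claim_ definition above) =====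
theorem choose_primary_intent_spec : Claim_equal_choose_primary_intent := by
  intro scores _ hpre
  obtain ⟨hne, -⟩ := hpre
  unfold Spec_choose_primary_intent choose_primary_intent choose_primary_intent_alt
  -- B's fold is pvBStep
  have hBfold : ∀ acc, scores.foldl
      (fun best kv =>
        let key : Int × Int × String :=
          (-kv.2,
           PySem.Dict.getD
             ((PySem.List.enumerate INTENT_PRIORITY).foldl (fun d p => d.insert p.2 p.1) PySem.Dict.empty)
             kv.1 (INTENT_PRIORITY.length : Int),
           kv.1)
        match best with
        | none => some key
        | some b => if pvTupleLt key b then some key else some b) acc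
      = scores.foldl pvBStep acc := by
    intro acc
    rfl
  rcases hmax : PySem.List.max? (scores.map (fun kv => kv.2)) (fun v => v) with _ | ms
  · exfalso
    have := (PySem.List.max?_eq_none_iff _ _).mp hmax
    rcases scores with _ | _
    · exact hne rfl
    · cases this
  · rw [hmax]
    -- value facts
    have hmsMem : ms ∈ scores.map (fun kv => kv.2) := PySem.List.max?_mem hmax
    have hmsMax : ∀ kv ∈ scores, kv.2 ≤ ms := by
      intro kv hkv
      exact PySem.List.max?_isMax hmax _ (List.mem_map.mpr ⟨kv, hkv, rfl⟩)
    -- B's fold produces a minimum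
    simp only [hBfold]
    obtain ⟨m, hm⟩ : ∃ m, scores.foldl pvBStep none = some m := by
      rcases scores with _ | ⟨x, t⟩
      · exact absurd rfl hne
      · rw [List.foldl_cons]
        exact pvBStep_some _ t
    rw [hm]
    obtain ⟨hmemm, hallm, -⟩ := pvBfold_go scores none m hm
    obtain ⟨kvm, hkvm, hkeym⟩ := hmemm.resolve_right (by intro h; cases h)
    -- m.1 = -ms
    obtain ⟨kvmax, hkvmax, hkvmax2⟩ := List.mem_map.mp hmsMem
    have hm1 : m.1 = -ms := by
      have h1 : pvTLe m (pvKey kvmax) := hallm _ hkvmax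
      have h2 : m.1 = -kvm.2 := by rw [← hkeym]; rfl
      have h3 : kvm.2 ≤ ms := hmsMax _ hkvm
      have h4 : m.1 ≤ -kvmax.2 := by
        rcases h1 with h | ⟨e, -⟩
        · exact le_of_lt h
        · exact le_of_eq e
      rw [hkvmax2] at h4
      omega
    by_cases hms : ms ≤ 0
    · have hb1 : 0 ≤ m.1 := by omega
      simp [hms, hb1]
    · have hb1 : ¬ 0 ≤ m.1 := by omega
      simp only [hms, if_false, hb1]
      set cands := (scores.filter (fun kv => kv.2 == ms)).map (fun kv => kv.1) with hcands
      -- A's pick r and the pair (r, ms) ∈ scores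
      obtain ⟨hrC, hrMin⟩ := A_select_min cands _ rfl (by
        intro h
        have : kvmax.1 ∈ cands := by
          rw [hcands]
          exact List.mem_map.mpr ⟨kvmax, List.mem_filter.mpr ⟨hkvmax, by simp [hkvmax2]⟩, rfl⟩
        rw [h] at this; cases this)
      set r := (match INTENT_PRIORITY.find? (fun intent => PySem.Set.contains (PySem.Set.ofList cands) intent) with
           | some intent => intent
           | none => (PySem.List.pyGet? (PySem.List.sorted (PySem.Set.ofList cands) (fun x => x) false) 0).getD "")
      obtain ⟨pr, hprF, hpr1⟩ := List.mem_map.mp hrC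
      have hpr2 : pr.2 = ms := by
        have := (List.mem_filter.mp hprF).2
        simpa using this
      have hprS : pr ∈ scores := (List.mem_filter.mp hprF).1
      -- key of A's pick
      have hkeyr : pvKey pr = (-ms, pvRank r, r) := by
        unfold pvKey
        rw [hpr1, hpr2]
      -- pvKey pr ≤ every key
      have hrAll : ∀ kv ∈ scores, pvTLe (pvKey pr) (pvKey kv) := by
        intro kv hkv
        by_cases hv : kv.2 = ms
        · have hkvC : kv.1 ∈ cands := by
            rw [hcands]
            exact List.mem_map.mpr ⟨kv, List.mem_filter.mpr ⟨hkv, by simp [hv]⟩, rfl⟩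
          have := hrMin _ hkvC
          rw [hkeyr]
          unfold pvKey
          rw [hv]
          rcases this with h | ⟨e, h⟩
          · exact Or.inr ⟨rfl, Or.inl h⟩
          · exact Or.inr ⟨rfl, Or.inr ⟨e, h⟩⟩
        · have : kv.2 < ms := lt_of_le_of_ne (hmsMax _ hkv) hv
          rw [hkeyr]
          unfold pvKey
          exact Or.inl (by omega)
      -- antisymmetry: m = pvKey pr, hence result names agree
      have hEq : m = pvKey pr := pvTLe_antisymm (hallm _ hprS) (by rw [← hkeym]; exact hrAll _ hkvm)
      rw [hEq, hkeyr]
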